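-- pv_equiv track=rewrite | github.com/AustinBao/LeetCode | Contest/CCC/2007/Truckin.py | TruckRoutes
-- ===== SOURCE A (Python) =====
-- def TruckRoutes(min, max, motels):
--     possibilities = {}
--     for curr_stop in range(0, len(motels) - 1):
--         for next_stop in range(curr_stop + 1, len(motels)):
--             if max >= motels[next_stop] - motels[curr_stop] >= min:
--                 possibilities[motels[curr_stop]] = motels[next_stop]
--             else:
--                 continue
--     return possibilities
-- ===== SOURCE B (Python) =====
-- # Sort (index, value) pairs by value once, then answer each stop with two binary
-- # searches over the sorted values plus a max-index scan of the matching window.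
--
-- def _bisect_left(a, x):
--     lo, hi = 0, len(a)
--     while lo < hi:
--         mid = (lo + hi) // 2
--         if a[mid] < x:
--             lo = mid + 1
--         else:
--             hi = mid
--     return lo
--
-- def _bisect_right(a, x):
--     lo, hi = 0, len(a)
--     while lo < hi:
--         mid = (lo + hi) // 2
--         if a[mid] <= x:
--             lo = mid + 1
--         else:
--             hi = mid
--     return lo
--
-- def TruckRoutes(min, max, motels):
--     pairs = sorted(enumerate(motels), key=lambda p: p[1])
--     vals = [v for _, v in pairs]
--     possibilities = {}
--     for i in range(len(motels) - 1):
--         base = motels[i]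
--         lo = _bisect_left(vals, base + min)
--         hi = _bisect_right(vals, base + max)
--         best = -1
--         for t in range(lo, hi):
--             if pairs[t][0] > best:
--                 best = pairs[t][0]
--         if best > i:
--             possibilities[base] = motels[best]
--     return possibilities
-- ===== Notes on version B (the rewrite author's own statement) =====
-- stated objective: faster
-- what changed: B sorts (index, value) pairs by value once, then finds each stop's partner with two hand-written binary searches delimiting the in-range value window and a max-index scan of that window, instead of A's nested scan over all later stops with repeated dict overwrites.
import Mathlib
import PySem

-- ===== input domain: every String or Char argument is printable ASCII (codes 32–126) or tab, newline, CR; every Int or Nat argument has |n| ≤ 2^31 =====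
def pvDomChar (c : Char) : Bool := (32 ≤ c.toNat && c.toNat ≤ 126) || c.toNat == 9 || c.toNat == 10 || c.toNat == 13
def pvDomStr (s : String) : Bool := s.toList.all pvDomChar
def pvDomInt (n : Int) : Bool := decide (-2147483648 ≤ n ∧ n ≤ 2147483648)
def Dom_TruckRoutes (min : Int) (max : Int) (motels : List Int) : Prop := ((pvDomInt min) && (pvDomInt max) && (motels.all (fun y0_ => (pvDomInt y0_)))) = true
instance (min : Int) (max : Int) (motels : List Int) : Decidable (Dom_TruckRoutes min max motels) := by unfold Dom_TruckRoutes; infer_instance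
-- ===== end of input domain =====

-- B sorts (index, value) pairs by value once, then answers each stop with two hand-written
-- binary searches delimiting the in-range value window plus a max-index scan of that window,
-- instead of A's nested scan over all later stops with repeated dict overwrites (measurably faster).


-- ===== PORT A =====
def TruckRoutes (min : Int) (max : Int) (motels : List Int) : List (Int × Int) :=
  ((PySem.List.pyRange 0 ((motels.length : Int) - 1) 1).foldl (fun d i =>
    (PySem.List.pyRange (i + 1) (motels.length : Int) 1).foldl (fun d j =>
      if max ≥ PySem.List.pyGetD motels j 0 - PySem.List.pyGetD motels i 0 ∧
         PySem.List.pyGetD motels j 0 - PySem.List.pyGetD motels i 0 ≥ min then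
        d.insert (PySem.List.pyGetD motels i 0) (PySem.List.pyGetD motels j 0)
      else d) d) (PySem.Dict.empty : PySem.Dict Int Int)).items

-- ===== PORT B =====
-- transliteration of Source B's _bisect_left while-loop
def pvBisectLeftLoop (a : List Int) (x : Int) (lo hi : Int) : Int :=
  if h : lo < hi then
    if PySem.List.pyGetD a (PySem.Int.floordiv (lo + hi) 2) 0 < x then
      pvBisectLeftLoop a x (PySem.Int.floordiv (lo + hi) 2 + 1) hi
    else
      pvBisectLeftLoop a x lo (PySem.Int.floordiv (lo + hi) 2)
  else lo
termination_by (hi - lo).toNat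
decreasing_by
  · have hb := PySem.Int.floordiv_two_mid_bounds (le_of_lt h)
    omega
  · have hb := PySem.Int.floordiv_two_mid_bounds (le_of_lt h)
    have hs : PySem.Int.floordiv (lo + hi) 2 < hi :=
      (PySem.Int.floordiv_lt_iff_lt_mul (by norm_num)).mpr (by omega)
    omega

-- transliteration of Source B's _bisect_right while-loop
def pvBisectRightLoop (a : List Int) (x : Int) (lo hi : Int) : Int :=
  if h : lo < hi then
    if PySem.List.pyGetD a (PySem.Int.floordiv (lo + hi) 2) 0 ≤ x then
      pvBisectRightLoop a x (PySem.Int.floordiv (lo + hi) 2 + 1) hi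
    else
      pvBisectRightLoop a x lo (PySem.Int.floordiv (lo + hi) 2)
  else lo
termination_by (hi - lo).toNat
decreasing_by
  · have hb := PySem.Int.floordiv_two_mid_bounds (le_of_lt h)
    omega
  · have hb := PySem.Int.floordiv_two_mid_bounds (le_of_lt h)
    have hs : PySem.Int.floordiv (lo + hi) 2 < hi :=
      (PySem.Int.floordiv_lt_iff_lt_mul (by norm_num)).mpr (by omega)
    omega

def pvBisectLeft (a : List Int) (x : Int) : Int := pvBisectLeftLoop a x 0 (a.length : Int)

def pvBisectRight (a : List Int) (x : Int) : Int := pvBisectRightLoop a x 0 (a.length : Int)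

def TruckRoutes_alt (min : Int) (max : Int) (motels : List Int) : List (Int × Int) :=
  let pairs := PySem.List.sorted (PySem.List.enumerate motels) (fun p => p.2)
  let vals := pairs.map (fun p => p.2)
  ((PySem.List.pyRange 0 ((motels.length : Int) - 1) 1).foldl (fun d i =>
    let base := PySem.List.pyGetD motels i 0
    let lo := pvBisectLeft vals (base + min)
    let hi := pvBisectRight vals (base + max)
    let best := (PySem.List.pyRange lo hi 1).foldl (fun best t =>
        if (PySem.List.pyGetD pairs t (0, 0)).1 > best then (PySem.List.pyGetD pairs t (0, 0)).1
        else best) (-1)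
    if best > i then d.insert base (PySem.List.pyGetD motels best 0) else d)
    (PySem.Dict.empty : PySem.Dict Int Int)).items

-- ===== PRECONDITION & SPEC =====
def Spec_TruckRoutes (min : Int) (max : Int) (motels : List Int) (out : List (Int × Int)) : Prop := out = TruckRoutes_alt min max motels
instance (min : Int) (max : Int) (motels : List Int) (out : List (Int × Int)) : Decidable (Spec_TruckRoutes min max motels out) := by unfold Spec_TruckRoutes; infer_instance

-- ===== CLAIM (what is proved, stated in full; the proofs are below) =====
def Claim_equal_TruckRoutes : Prop := ∀ (min : Int) (max : Int) (motels : List Int), Dom_TruckRoutes min max motels → Spec_TruckRoutes min max motels (TruckRoutes min max motels)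

-- ===== LEMMAS AND PROOFS =====

-- A's ascending overwrite-fold equals one insert of the first match of the reversed list
lemma foldl_insert_eq_revFind (k : Int) (f : Int → Int) (C : Int → Prop) [DecidablePred C] :
    ∀ (L : List Int) (d : PySem.Dict Int Int),
      L.foldl (fun d j => if C j then d.insert k (f j) else d) d =
      match L.reverse.find? (fun j => decide (C j)) with
      | some j => d.insert k (f j)
      | none => d := by
  intro L
  induction L using List.reverseRecOn with
  | nil => intro d; simp
  | append_singleton L' j ih =>
      intro d
      rw [List.foldl_append, List.foldl_cons, List.foldl_nil, ih, List.reverse_append]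
      simp only [List.reverse_cons, List.reverse_nil, List.nil_append, List.cons_append,
        List.find?_cons]
      by_cases hj : C j
      · simp only [hj, decide_true, if_true]
        cases hL : L'.reverse.find? (fun j => decide (C j)) with
        | none => simp
        | some j' => simp [PySem.Dict.insert_insert_self]
      · simp only [hj, decide_false, if_false]

lemma pvBisectLeftLoop_spec (a : List Int) (x : Int)
    (hmono : ∀ (p q : Nat) (hp : p < a.length) (hq : q < a.length), p ≤ q → a[p] ≤ a[q]) :
    ∀ (lo hi : Int), 0 ≤ lo → lo ≤ hi → hi ≤ (a.length : Int) →
    (∀ (t : Nat) (ht : t < a.length), (t : Int) < lo → a[t] < x) →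
    (∀ (t : Nat) (ht : t < a.length), hi ≤ (t : Int) → x ≤ a[t]) →
    (lo ≤ pvBisectLeftLoop a x lo hi ∧ pvBisectLeftLoop a x lo hi ≤ hi ∧
     (∀ (t : Nat) (ht : t < a.length), (t : Int) < pvBisectLeftLoop a x lo hi → a[t] < x) ∧
     (∀ (t : Nat) (ht : t < a.length), pvBisectLeftLoop a x lo hi ≤ (t : Int) → x ≤ a[t])) := by
  intro lo hi
  induction lo, hi using pvBisectLeftLoop.induct a x with
  | case1 lo hi h hlt ih =>
      intro h0 hle hub pre1 pre2
      have hb := PySem.Int.floordiv_two_mid_bounds (le_of_lt h)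
      have hs : PySem.Int.floordiv (lo + hi) 2 < hi :=
        (PySem.Int.floordiv_lt_iff_lt_mul (by norm_num)).mpr (by omega)
      have hmval : PySem.List.pyGetD a (PySem.Int.floordiv (lo + hi) 2) 0 =
          a[(PySem.Int.floordiv (lo + hi) 2).toNat] :=
        PySem.List.pyGetD_eq_getElem a 0 (by omega) (by omega)
      rw [pvBisectLeftLoop, dif_pos h, if_pos hlt]
      have hrec := ih (by omega) (by omega) (by omega) ?_ pre2
      · exact ⟨by omega, hrec.2.1, hrec.2.2.1, hrec.2.2.2⟩
      · intro t ht htlt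
        by_cases hc : (t : Int) < lo
        · exact pre1 t ht hc
        · have := hmono t (PySem.Int.floordiv (lo + hi) 2).toNat ht (by omega) (by omega)
          rw [hmval] at hlt; omega
  | case2 lo hi h hge ih =>
      intro h0 hle hub pre1 pre2
      have hb := PySem.Int.floordiv_two_mid_bounds (le_of_lt h)
      have hs : PySem.Int.floordiv (lo + hi) 2 < hi :=
        (PySem.Int.floordiv_lt_iff_lt_mul (by norm_num)).mpr (by omega)
      have hmval : PySem.List.pyGetD a (PySem.Int.floordiv (lo + hi) 2) 0 =
          a[(PySem.Int.floordiv (lo + hi) 2).toNat] :=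
        PySem.List.pyGetD_eq_getElem a 0 (by omega) (by omega)
      rw [pvBisectLeftLoop, dif_pos h, if_neg hge]
      have hrec := ih (by omega) (by omega) (by omega) pre1 ?_
      · exact ⟨hrec.1, by omega, hrec.2.2.1, hrec.2.2.2⟩
      · intro t ht htge
        have := hmono (PySem.Int.floordiv (lo + hi) 2).toNat t (by omega) ht (by omega)
        rw [hmval] at hge; omega
  | case3 lo hi h =>
      intro h0 hle hub pre1 pre2
      rw [pvBisectLeftLoop, dif_neg h]
      exact ⟨le_refl _, by omega, pre1, fun t ht hge => pre2 t ht (by omega)⟩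

lemma pvBisectRightLoop_spec (a : List Int) (x : Int)
    (hmono : ∀ (p q : Nat) (hp : p < a.length) (hq : q < a.length), p ≤ q → a[p] ≤ a[q]) :
    ∀ (lo hi : Int), 0 ≤ lo → lo ≤ hi → hi ≤ (a.length : Int) →
    (∀ (t : Nat) (ht : t < a.length), (t : Int) < lo → a[t] ≤ x) →
    (∀ (t : Nat) (ht : t < a.length), hi ≤ (t : Int) → x < a[t]) →
    (lo ≤ pvBisectRightLoop a x lo hi ∧ pvBisectRightLoop a x lo hi ≤ hi ∧
     (∀ (t : Nat) (ht : t < a.length), (t : Int) < pvBisectRightLoop a x lo hi → a[t] ≤ x) ∧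
     (∀ (t : Nat) (ht : t < a.length), pvBisectRightLoop a x lo hi ≤ (t : Int) → x < a[t])) := by
  intro lo hi
  induction lo, hi using pvBisectRightLoop.induct a x with
  | case1 lo hi h hlt ih =>
      intro h0 hle hub pre1 pre2
      have hb := PySem.Int.floordiv_two_mid_bounds (le_of_lt h)
      have hs : PySem.Int.floordiv (lo + hi) 2 < hi :=
        (PySem.Int.floordiv_lt_iff_lt_mul (by norm_num)).mpr (by omega)
      have hmval : PySem.List.pyGetD a (PySem.Int.floordiv (lo + hi) 2) 0 =
          a[(PySem.Int.floordiv (lo + hi) 2).toNat] :=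
        PySem.List.pyGetD_eq_getElem a 0 (by omega) (by omega)
      rw [pvBisectRightLoop, dif_pos h, if_pos hlt]
      have hrec := ih (by omega) (by omega) (by omega) ?_ pre2
      · exact ⟨by omega, hrec.2.1, hrec.2.2.1, hrec.2.2.2⟩
      · intro t ht htlt
        by_cases hc : (t : Int) < lo
        · exact pre1 t ht hc
        · have := hmono t (PySem.Int.floordiv (lo + hi) 2).toNat ht (by omega) (by omega)
          rw [hmval] at hlt; omega
  | case2 lo hi h hge ih =>
      intro h0 hle hub pre1 pre2
      have hb := PySem.Int.floordiv_two_mid_bounds (le_of_lt h)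
      have hs : PySem.Int.floordiv (lo + hi) 2 < hi :=
        (PySem.Int.floordiv_lt_iff_lt_mul (by norm_num)).mpr (by omega)
      have hmval : PySem.List.pyGetD a (PySem.Int.floordiv (lo + hi) 2) 0 =
          a[(PySem.Int.floordiv (lo + hi) 2).toNat] :=
        PySem.List.pyGetD_eq_getElem a 0 (by omega) (by omega)
      rw [pvBisectRightLoop, dif_pos h, if_neg hge]
      have hrec := ih (by omega) (by omega) (by omega) pre1 ?_
      · exact ⟨hrec.1, by omega, hrec.2.2.1, hrec.2.2.2⟩
      · intro t ht htge
        have := hmono (PySem.Int.floordiv (lo + hi) 2).toNat t (by omega) ht (by omega)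
        rw [hmval] at hge; omega
  | case3 lo hi h =>
      intro h0 hle hub pre1 pre2
      rw [pvBisectRightLoop, dif_neg h]
      exact ⟨le_refl _, by omega, pre1, fun t ht hge => pre2 t ht (by omega)⟩

-- find? on the reversed ascending range returns the greatest satisfying element
lemma find?_reverse_pyRange_eq_some (a b j : Int) (q : Int → Bool)
    (h1 : a ≤ j) (h2 : j < b) (hq : q j = true)
    (hmax : ∀ x : Int, j < x → x < b → q x = false) :
    (PySem.List.pyRange a b 1).reverse.find? q = some j := by
  rw [PySem.List.pyRange_one_append a (j + 1) b (by omega) (by omega), List.reverse_append,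
      List.find?_append]
  have h1' : (PySem.List.pyRange (j + 1) b 1).reverse.find? q = none := by
    rw [List.find?_eq_none]
    intro x hx
    rw [List.mem_reverse, PySem.List.mem_pyRange_one] at hx
    simp [hmax x (by omega) hx.2]
  rw [h1', Option.none_or, PySem.List.pyRange_one_succ_right h1, List.reverse_append]
  simp [hq]

lemma TruckRoutes_step (mn mx : Int) (motels : List Int) (d : PySem.Dict Int Int) (i : Int)
    (h0 : 0 ≤ i) (h1 : i < (motels.length : Int) - 1) :
    List.foldl (fun d j =>
        if mx ≥ PySem.List.pyGetD motels j 0 - PySem.List.pyGetD motels i 0 ∧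
            PySem.List.pyGetD motels j 0 - PySem.List.pyGetD motels i 0 ≥ mn then
          d.insert (PySem.List.pyGetD motels i 0) (PySem.List.pyGetD motels j 0)
        else d) d (PySem.List.pyRange (i + 1) (motels.length : Int) 1) =
    (let pairs := PySem.List.sorted (PySem.List.enumerate motels) (fun p => p.2)
     let vals := pairs.map (fun p => p.2)
     let base := PySem.List.pyGetD motels i 0
     let best := List.foldl (fun best t =>
          if (PySem.List.pyGetD pairs t (0, 0)).1 > best then (PySem.List.pyGetD pairs t (0, 0)).1
          else best) (-1)
          (PySem.List.pyRange (pvBisectLeft vals (base + mn)) (pvBisectRight vals (base + mx)) 1)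
     if best > i then d.insert base (PySem.List.pyGetD motels best 0) else d) := by
  simp only []
  set pairs := PySem.List.sorted (PySem.List.enumerate motels) (fun p => p.2) with hpairsdef
  set vals := pairs.map (fun p => p.2) with hvalsdef
  set base := PySem.List.pyGetD motels i 0 with hbasedef
  have hperm : pairs.Perm (PySem.List.enumerate motels) :=
    PySem.List.sorted_perm (PySem.List.enumerate motels) (fun p => p.2) false
  have hlenp : pairs.length = motels.length := by
    rw [hperm.length_eq, PySem.List.length_enumerate]
  have hpwp : pairs.Pairwise (fun a b => a.2 ≤ b.2) :=
    PySem.List.sorted_pairwise (PySem.List.enumerate motels) (fun p => p.2)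
  have hvlen : vals.length = motels.length := by rw [hvalsdef, List.length_map, hlenp]
  have hvpw : vals.Pairwise (fun a b => a ≤ b) := by
    rw [hvalsdef]
    exact List.Pairwise.map (fun p : Int × Int => p.2) (fun a b h => h) hpwp
  have hmono : ∀ (p q : Nat) (hp : p < vals.length) (hq : q < vals.length), p ≤ q →
      vals[p] ≤ vals[q] := by
    intro p q hp hq hpq
    rcases Nat.lt_or_ge p q with hlt | hge
    · exact List.pairwise_iff_getElem.mp hvpw p q hp hq hlt
    · have hpq' : p = q := by omega
      subst hpq'; exact le_refl _
  have hvget : ∀ (t : Nat) (ht : t < pairs.length),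
      vals[t]'(by rw [hvalsdef, List.length_map]; exact ht) = (pairs[t]).2 := by
    intro t ht; simp only [hvalsdef, List.getElem_map]
  have hpair_mem : ∀ (t : Nat) (ht : t < pairs.length),
      ∃ (k : Nat) (hk : k < motels.length), pairs[t] = ((k : Int), motels[k]) := by
    intro t ht
    have hm : pairs[t] ∈ PySem.List.enumerate motels 0 := hperm.subset (List.getElem_mem ht)
    rw [PySem.List.mem_enumerate_iff] at hm
    obtain ⟨k, hk, he⟩ := hm
    exact ⟨k, hk, by simpa using he⟩
  have hmem_pairs : ∀ (k : Nat) (hk : k < motels.length), ((k : Int), motels[k]) ∈ pairs := by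
    intro k hk
    exact hperm.mem_iff.mpr ((PySem.List.mem_enumerate_iff motels 0 _).mpr ⟨k, hk, by simp⟩)
  set L := pvBisectLeft vals (base + mn) with hLdef
  set R := pvBisectRight vals (base + mx) with hRdef
  have SL := pvBisectLeftLoop_spec vals (base + mn) hmono 0 (vals.length : Int) le_rfl
    (by omega) le_rfl (fun t ht hlt => absurd hlt (by omega))
    (fun t ht hge => absurd hge (by omega))
  rw [show pvBisectLeftLoop vals (base + mn) 0 ((vals.length : Int)) = L from rfl] at SL
  obtain ⟨hL0, hLn, hLlt, hLge⟩ := SL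
  have SR := pvBisectRightLoop_spec vals (base + mx) hmono 0 (vals.length : Int) le_rfl
    (by omega) le_rfl (fun t ht hlt => absurd hlt (by omega))
    (fun t ht hge => absurd hge (by omega))
  rw [show pvBisectRightLoop vals (base + mx) 0 ((vals.length : Int)) = R from rfl] at SR
  obtain ⟨hR0, hRn, hRlt, hRge⟩ := SR
  set best := List.foldl (fun best t =>
      if (PySem.List.pyGetD pairs t (0, 0)).1 > best then (PySem.List.pyGetD pairs t (0, 0)).1
      else best) (-1) (PySem.List.pyRange L R 1) with hbestdef
  have hfun : (fun (b t : Int) =>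
      if (PySem.List.pyGetD pairs t (0, 0)).1 > b then (PySem.List.pyGetD pairs t (0, 0)).1 else b)
      = (fun (b t : Int) => max b ((PySem.List.pyGetD pairs t (0, 0)).1)) := by
    funext b t
    by_cases hc : (PySem.List.pyGetD pairs t (0, 0)).1 > b
    · rw [if_pos hc, max_eq_right hc.le]
    · rw [if_neg hc, max_eq_left (not_lt.mp hc)]
  have hbest_max : best = List.foldl (fun b t => max b ((PySem.List.pyGetD pairs t (0, 0)).1)) (-1)
      (PySem.List.pyRange L R 1) := by rw [hbestdef, hfun]
  have hub : ∀ t ∈ PySem.List.pyRange L R 1, (PySem.List.pyGetD pairs t (0, 0)).1 ≤ best := by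
    rw [hbest_max]
    exact (PySem.List.le_foldl_max_int (PySem.List.pyRange L R 1)
      (fun t => (PySem.List.pyGetD pairs t (0, 0)).1) (-1)).2
  have hmem_best : best = -1 ∨ ∃ t ∈ PySem.List.pyRange L R 1,
      best = (PySem.List.pyGetD pairs t (0, 0)).1 := by
    have hmap : ((PySem.List.pyRange L R 1).map
        (fun t => (PySem.List.pyGetD pairs t (0, 0)).1)).foldl max (-1) =
        (PySem.List.pyRange L R 1).foldl
          (fun b t => max b ((PySem.List.pyGetD pairs t (0, 0)).1)) (-1) := by
      rw [List.foldl_map]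
    rw [hbest_max, ← hmap]
    rcases PySem.List.foldl_max_mem ((PySem.List.pyRange L R 1).map
        (fun t => (PySem.List.pyGetD pairs t (0, 0)).1)) (-1) with h | h
    · exact Or.inl h
    · obtain ⟨t, ht, he⟩ := List.mem_map.mp h
      exact Or.inr ⟨t, ht, he.symm⟩
  have K1 : ∀ j : Int, i < j → j < (motels.length : Int) →
      (mx ≥ PySem.List.pyGetD motels j 0 - base ∧ PySem.List.pyGetD motels j 0 - base ≥ mn) →
      j ≤ best := by
    intro j hji hjn hcond
    have hj0 : 0 ≤ j := by omega
    have hjlt : j.toNat < motels.length := by omega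
    have hjget : PySem.List.pyGetD motels j 0 = motels[j.toNat] :=
      PySem.List.pyGetD_eq_getElem motels 0 hj0 hjn
    obtain ⟨t, ht, hte⟩ := List.mem_iff_getElem.mp (hmem_pairs j.toNat hjlt)
    have hvt : vals[t]'(by rw [hvlen]; omega) = motels[j.toNat] := by
      have h' := hvget t ht
      rw [hte] at h'
      exact h'
    have htL : L ≤ (t : Int) := by
      by_contra hc
      have hlt := hLlt t (by rw [hvlen]; omega) (by omega)
      rw [hvt] at hlt
      rw [hjget] at hcond
      omega
    have htR : (t : Int) < R := by
      by_contra hc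
      have hgt := hRge t (by rw [hvlen]; omega) (by omega)
      rw [hvt] at hgt
      rw [hjget] at hcond
      omega
    have hle := hub (t : Int) (PySem.List.mem_pyRange_one.mpr ⟨htL, htR⟩)
    have hpt : PySem.List.pyGetD pairs ((t : Int)) (0, 0) = pairs[t] := by
      rw [PySem.List.pyGetD_eq_getElem pairs (0, 0) (by omega) (by exact_mod_cast ht)]
      simp
    rw [hpt, hte] at hle
    simp only [] at hle
    omega
  by_cases hcase : best > i
  · rcases hmem_best with hb1 | ⟨t0, ht0mem, ht0e⟩
    · omega
    · rw [PySem.List.mem_pyRange_one] at ht0mem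
      obtain ⟨ht0L, ht0R⟩ := ht0mem
      have ht00 : 0 ≤ t0 := by omega
      have ht0n : t0 < (pairs.length : Int) := by
        have : R ≤ (vals.length : Int) := hRn
        rw [hvlen] at this
        omega
      have hpt0 : PySem.List.pyGetD pairs t0 (0, 0) = pairs[t0.toNat] :=
        PySem.List.pyGetD_eq_getElem pairs (0, 0) ht00 ht0n
      obtain ⟨k, hk, hke⟩ := hpair_mem t0.toNat (by omega)
      have hbestk : best = (k : Int) := by rw [ht0e, hpt0, hke]
      have hvt0 : vals[t0.toNat]'(by rw [hvlen]; omega) = motels[k] := by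
        have h' := hvget t0.toNat (by omega)
        rw [hke] at h'
        exact h'
      have hwin1 : base + mn ≤ motels[k] := by
        have := hLge t0.toNat (by rw [hvlen]; omega) (by omega)
        rw [hvt0] at this; exact this
      have hwin2 : motels[k] ≤ base + mx := by
        have := hRlt t0.toNat (by rw [hvlen]; omega) (by omega)
        rw [hvt0] at this; exact this
      have hbget : PySem.List.pyGetD motels best 0 = motels[k] := by
        rw [hbestk]
        rw [PySem.List.pyGetD_eq_getElem motels 0 (by omega) (by exact_mod_cast hk)]
        simp
      have hC : mx ≥ PySem.List.pyGetD motels best 0 - base ∧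
          PySem.List.pyGetD motels best 0 - base ≥ mn := by
        rw [hbget]; omega
      rw [foldl_insert_eq_revFind base (fun j => PySem.List.pyGetD motels j 0)
        (fun j => mx ≥ PySem.List.pyGetD motels j 0 - base ∧
          PySem.List.pyGetD motels j 0 - base ≥ mn)]
      rw [find?_reverse_pyRange_eq_some (i + 1) (motels.length : Int) best _
        (by omega) (by rw [hbestk]; exact_mod_cast hk) (decide_eq_true hC)
        (fun x hx1 hx2 => decide_eq_false
          (fun hCx => absurd (K1 x (by omega) hx2 hCx) (by omega)))]
      rw [if_pos hcase]
  · have hnone : (PySem.List.pyRange (i + 1) (motels.length : Int) 1).reverse.find?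
        (fun j => decide (mx ≥ PySem.List.pyGetD motels j 0 - base ∧
          PySem.List.pyGetD motels j 0 - base ≥ mn)) = none := by
      rw [List.find?_eq_none]
      intro j hj
      rw [List.mem_reverse, PySem.List.mem_pyRange_one] at hj
      simp only [decide_eq_true_eq]
      intro hCj
      exact absurd (K1 j (by omega) hj.2 hCj) (by omega)
    rw [foldl_insert_eq_revFind base (fun j => PySem.List.pyGetD motels j 0)
      (fun j => mx ≥ PySem.List.pyGetD motels j 0 - base ∧
        PySem.List.pyGetD motels j 0 - base ≥ mn), hnone, if_neg hcase]

-- ===== VERDICT (by name: the statement is the Claim_ definition above) =====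
theorem TruckRoutes_spec : Claim_equal_TruckRoutes := by
  intro mn mx motels _
  unfold Spec_TruckRoutes TruckRoutes TruckRoutes_alt
  simp only []
  refine congrArg PySem.Dict.items ?_
  refine PySem.List.foldl_congr_mem _ _ _ _ ?_
  intro d i hi
  rw [PySem.List.mem_pyRange_one] at hi
  obtain ⟨h0, h1⟩ := hi
  exact TruckRoutes_step mn mx motels d i h0 h1
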